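-- pv_equiv track=rewrite | github.com/hujanais/AoC-2025 | solutions/day2.py | is_repeat
-- ===== SOURCE A (Python) =====
-- def is_repeat(value: int) -> bool:
--     strValue = str(value)
--
--     # exit if string len is odd.
--     strLen = len(strValue)
--     if strLen % 2 != 0:
--         return False
--
--     firstIdx = 0
--     midIdx = int(strLen / 2)
--     secondIdx = midIdx
--
--     while firstIdx < midIdx:
--         if strValue[firstIdx] != strValue[secondIdx]:
--             return False
--         firstIdx += 1
--         secondIdx += 1
--
--     return True
-- ===== SOURCE B (Python) =====
-- def is_repeat(value: int) -> bool:
--     # Arithmetic split: compare value's high and low digit halves without strings.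
--     if value <= 0:
--         return False
--     digits = 0
--     t = value
--     while t > 0:
--         digits += 1
--         t //= 10
--     if digits % 2 != 0:
--         return False
--     p = 10 ** (digits // 2)
--     return value // p == value % p
-- ===== Notes on version B (the rewrite author's own statement) =====
-- stated objective: alternative
-- what changed: B replaces A's string conversion and character-by-character index loop over the two halves with a purely arithmetic test: guard non-positive values, count the digits by repeated division, then compare the high digit half (integer division by a power of ten) with the low digit half (the remainder).
import Mathlib
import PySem

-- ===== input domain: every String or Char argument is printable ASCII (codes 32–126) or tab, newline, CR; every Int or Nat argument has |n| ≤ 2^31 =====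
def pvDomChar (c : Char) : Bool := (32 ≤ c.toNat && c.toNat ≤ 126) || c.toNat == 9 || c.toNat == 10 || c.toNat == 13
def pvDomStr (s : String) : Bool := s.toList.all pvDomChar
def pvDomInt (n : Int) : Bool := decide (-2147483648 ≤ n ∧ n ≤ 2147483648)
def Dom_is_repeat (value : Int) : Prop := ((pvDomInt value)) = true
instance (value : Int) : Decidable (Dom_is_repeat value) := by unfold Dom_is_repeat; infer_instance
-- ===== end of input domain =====

-- B replaces A's character-by-character half comparison of str(value) by a purely
-- arithmetic split (digit count, then floor-division/remainder by a power of ten): alternative algorithm.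

-- ===== PORT A =====
-- A's while loop: firstIdx/secondIdx advance together; indices stay in range in A
def isRepeatLoop (strValue : List Char) (midIdx firstIdx secondIdx : Nat) : Bool :=
  if h : firstIdx < midIdx then
    if strValue.getD firstIdx ' ' ≠ strValue.getD secondIdx ' ' then false
    else isRepeatLoop strValue midIdx (firstIdx + 1) (secondIdx + 1)
  else true
termination_by midIdx - firstIdx

def is_repeat (value : Int) : Bool :=
  let strValue := PySem.Int.toChars value
  let strLen := strValue.length
  if strLen % 2 ≠ 0 then false
  else isRepeatLoop strValue (strLen / 2) 0 (strLen / 2)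

-- ===== PORT B =====
-- the digit-count loop of Source B
def altNumDigits (t : Int) : Nat :=
  if h : 0 < t then altNumDigits (PySem.Int.floordiv t 10) + 1 else 0
termination_by t.toNat
decreasing_by
  rw [PySem.Int.floordiv_eq_ediv_of_pos (by omega : (0:Int) < 10)]
  omega

def is_repeat_alt (value : Int) : Bool :=
  if value ≤ 0 then false
  else
    let digits := altNumDigits value
    if digits % 2 ≠ 0 then false
    else
      let p : Int := 10 ^ (digits / 2)
      PySem.Int.floordiv value p == PySem.Int.mod value p

-- ===== PRECONDITION & SPEC =====
def Spec_is_repeat (value : Int) (out : Bool) : Prop := out = is_repeat_alt value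
instance (value : Int) (out : Bool) : Decidable (Spec_is_repeat value out) := by unfold Spec_is_repeat; infer_instance

-- ===== CLAIM (what is proved, stated in full; the proofs are below) =====
def Claim_equal_is_repeat : Prop := ∀ (value : Int), Dom_is_repeat value → Spec_is_repeat value (is_repeat value)

-- ===== LEMMAS AND PROOFS =====

lemma digitChar_ne_dash (d : Nat) : Nat.digitChar d ≠ '-' := by
  by_cases h : d < 16
  · interval_cases d <;> decide
  · have h16 : Nat.digitChar d = '*' := by
      unfold Nat.digitChar
      rw [if_neg (by omega), if_neg (by omega), if_neg (by omega), if_neg (by omega),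
        if_neg (by omega), if_neg (by omega), if_neg (by omega), if_neg (by omega),
        if_neg (by omega), if_neg (by omega), if_neg (by omega), if_neg (by omega),
        if_neg (by omega), if_neg (by omega), if_neg (by omega), if_neg (by omega)]
    rw [h16]; decide

-- getD view of the reversed digit-char list A iterates over
lemma revMap_getD (L : List Nat) (j : Nat) (h : j < L.length) :
    ((L.map Nat.digitChar).reverse).getD j ' ' = Nat.digitChar (L.getD (L.length - 1 - j) 0) := by
  rw [List.getD_eq_getElem _ _ (by simpa using h), List.getElem_reverse]
  simp only [List.getElem_map, List.length_map]
  rw [List.getD_eq_getElem _ _ (by omega)]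

lemma digitChar_toNat : ∀ n, n < 10 → (Nat.digitChar n).toNat = 48 + n := by decide

lemma digitChar_inj {a b : Nat} (ha : a < 10) (hb : b < 10)
    (h : Nat.digitChar a = Nat.digitChar b) : a = b := by
  have := congrArg Char.toNat h
  rw [digitChar_toNat a ha, digitChar_toNat b hb] at this
  omega

-- core's toDigits (base 10) is the reversed, digit-char-mapped Nat.digits
lemma toDigitsCore_eq (f : Nat) : ∀ (m : Nat) (acc : List Char), 0 < m → m < f →
    Nat.toDigitsCore 10 f m acc = ((Nat.digits 10 m).map Nat.digitChar).reverse ++ acc := by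
  induction f with
  | zero => intro m acc _ h; omega
  | succ f ih =>
    intro m acc hm _
    rw [Nat.digits_def' (by norm_num : 1 < 10) hm]
    simp only [Nat.toDigitsCore, List.map_cons, List.reverse_cons]
    by_cases h10 : m / 10 = 0
    · rw [if_pos h10, h10]
      simp
    · rw [if_neg h10, ih (m / 10) _ (by omega) (by omega)]
      simp

lemma toDigits_eq (m : Nat) (hm : 0 < m) :
    Nat.toDigits 10 m = ((Nat.digits 10 m).map Nat.digitChar).reverse := by
  have := toDigitsCore_eq (m + 1) m [] hm (by omega)
  simpa [Nat.toDigits] using this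

lemma altNumDigits_len : ∀ (n : Nat) (t : Int), 0 < t → t.toNat = n →
    altNumDigits t = (Nat.digits 10 t.toNat).length := by
  intro n
  induction n using Nat.strong_induction_on with
  | _ n ih =>
    intro t ht hn
    rw [altNumDigits, dif_pos ht,
      PySem.Int.floordiv_eq_ediv_of_pos (by omega : (0:Int) < 10)]
    rw [Nat.digits_def' (by norm_num : 1 < 10) (by omega : 0 < t.toNat)]
    have htn : (t / 10).toNat = t.toNat / 10 := by omega
    by_cases h10 : t.toNat / 10 = 0
    · rw [h10]
      have h0 : t / 10 = 0 := by omega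
      rw [h0]
      simp [altNumDigits]
    · rw [ih (t.toNat / 10) (by omega) (t / 10) (by omega) htn, htn]
      simp

-- the while loop, with secondIdx = firstIdx + midIdx, decides pointwise half equality
lemma loop_eq_decide (c : List Char) (k : Nat) : ∀ (n i : Nat), k - i = n →
    isRepeatLoop c k i (i + k)
      = decide (∀ j, i ≤ j → j < k → c.getD j ' ' = c.getD (j + k) ' ') := by
  intro n
  induction n with
  | zero =>
    intro i h
    rw [isRepeatLoop, dif_neg (by omega)]
    symm; rw [decide_eq_true_iff]
    intro j h1 h2; omega
  | succ n ih =>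
    intro i h
    rw [isRepeatLoop, dif_pos (by omega : i < k)]
    by_cases heq : c.getD i ' ' = c.getD (i + k) ' '
    · rw [if_neg (not_not_intro heq)]
      have hidx : i + k + 1 = i + 1 + k := by omega
      rw [hidx, ih (i + 1) (by omega)]
      rw [decide_eq_decide]
      constructor
      · intro hp j h1 h2
        rcases Nat.eq_or_lt_of_le h1 with rfl | hlt
        · exact heq
        · exact hp j hlt h2
      · intro hp j h1 h2; exact hp j (by omega) h2
    · rw [if_pos heq]
      symm; rw [decide_eq_false_iff_not]
      intro hp; exact heq (hp i le_rfl (by omega))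

lemma loop_eq_decide_zero (c : List Char) (k : Nat) :
    isRepeatLoop c k 0 k
      = decide (∀ j, j < k → c.getD j ' ' = c.getD (j + k) ' ') := by
  have h := loop_eq_decide c k k 0 (by omega)
  simp only [Nat.zero_add] at h
  rw [h, decide_eq_decide]
  exact ⟨fun hp j hj => hp j (Nat.zero_le j) hj, fun hp j _ hj => hp j hj⟩

-- ofDigits is injective on same-length lists of base-10 digits
lemma ofDigits_inj : ∀ (t dr : List Nat), t.length = dr.length →
    (∀ d ∈ t, d < 10) → (∀ d ∈ dr, d < 10) →
    Nat.ofDigits 10 t = Nat.ofDigits 10 dr → t = dr := by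
  intro t
  induction t with
  | nil => intro dr hl _ _ _; cases dr <;> simp_all
  | cons a t ih =>
    intro dr hl h1 h2 hv
    cases dr with
    | nil => simp at hl
    | cons b dr =>
      simp only [Nat.ofDigits_cons] at hv
      have ha : a < 10 := h1 a (by simp)
      have hb : b < 10 := h2 b (by simp)
      have hab : a = b := by omega
      subst hab
      have hteq : Nat.ofDigits 10 t = Nat.ofDigits 10 dr := by omega
      rw [ih dr (by simpa using hl) (fun d hd => h1 d (by simp [hd]))
        (fun d hd => h2 d (by simp [hd])) hteq]

lemma ofDigits_lt (l : List Nat) (h : ∀ d ∈ l, d < 10) :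
    Nat.ofDigits 10 l < 10 ^ l.length := by
  induction l with
  | nil => simp
  | cons a l ih =>
    simp only [Nat.ofDigits_cons, List.length_cons, pow_succ]
    have ha := h a (by simp)
    have := ih (fun d hd => h d (by simp [hd]))
    nlinarith

-- negative values: the '-' at index 0 never equals the digit char at index mid
lemma neg_loop (D : List Nat) (hD : D ≠ []) (n : Nat) (hn : n = (D.length + 1) / 2) :
    isRepeatLoop ('-' :: (D.map Nat.digitChar).reverse) n 0 n = false := by
  have hDpos : 0 < D.length := List.length_pos_of_ne_nil hD
  have hnpos : 0 < n := by omega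
  rw [isRepeatLoop, dif_pos hnpos]
  have hne : ('-' :: (D.map Nat.digitChar).reverse).getD 0 ' '
      ≠ ('-' :: (D.map Nat.digitChar).reverse).getD n ' ' := by
    have h1 : n = (n - 1) + 1 := by omega
    rw [List.getD_cons_zero, h1, List.getD_cons_succ, revMap_getD _ _ (by omega)]
    exact fun hh => digitChar_ne_dash _ hh.symm
  rw [if_pos hne]

-- main positive case: char-half equality ↔ arithmetic-half equality
lemma pos_case (m : Nat) (hm : 0 < m) (k : Nat)
    (hlen : (Nat.digits 10 m).length = 2 * k) :
    (∀ j, j < k →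
        (((Nat.digits 10 m).map Nat.digitChar).reverse).getD j ' '
          = (((Nat.digits 10 m).map Nat.digitChar).reverse).getD (j + k) ' ')
      ↔ m / 10 ^ k = m % 10 ^ k := by
  set L := Nat.digits 10 m with hL
  have hlt : ∀ d ∈ L, d < 10 := fun d hd => Nat.digits_lt_base (by norm_num) hd
  have hmL : Nat.ofDigits 10 L = m := Nat.ofDigits_digits 10 m
  have hsplit : Nat.ofDigits 10 L
      = Nat.ofDigits 10 (L.take k) + 10 ^ k * Nat.ofDigits 10 (L.drop k) := by
    conv_lhs => rw [← List.take_append_drop k L]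
    rw [Nat.ofDigits_append, List.length_take]
    have hmin : min k L.length = k := by omega
    rw [hmin]
  have htlt : Nat.ofDigits 10 (L.take k) < 10 ^ k := by
    have h1 := ofDigits_lt (L.take k) (fun d hd => hlt d (List.mem_of_mem_take hd))
    have hltk : (L.take k).length = k := by rw [List.length_take]; omega
    rwa [hltk] at h1
  have hdiv : m / 10 ^ k = Nat.ofDigits 10 (L.drop k) := by
    rw [← hmL, hsplit, Nat.add_mul_div_left _ _ (pow_pos (by norm_num : 0 < 10) k),
      Nat.div_eq_of_lt htlt, zero_add]
  have hmod : m % 10 ^ k = Nat.ofDigits 10 (L.take k) := by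
    rw [← hmL, hsplit, Nat.add_mul_mod_self_left, Nat.mod_eq_of_lt htlt]
  have hgmem : ∀ i, i < L.length → L.getD i 0 ∈ L := by
    intro i hi
    rw [List.getD_eq_getElem _ _ hi]
    exact List.getElem_mem hi
  have hchar : (∀ j, j < k →
        ((L.map Nat.digitChar).reverse).getD j ' '
          = ((L.map Nat.digitChar).reverse).getD (j + k) ' ')
      ↔ (∀ i, i < k → L.getD i 0 = L.getD (k + i) 0) := by
    constructor
    · intro hc i hi
      have h0 := hc (k - 1 - i) (by omega)
      rw [revMap_getD L _ (by omega), revMap_getD L _ (by omega)] at h0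
      have h1 : L.length - 1 - (k - 1 - i) = k + i := by omega
      have h2 : L.length - 1 - (k - 1 - i + k) = i := by omega
      rw [h1, h2] at h0
      exact (digitChar_inj (hlt _ (hgmem _ (by omega))) (hlt _ (hgmem _ (by omega))) h0).symm
    · intro hd j hj
      rw [revMap_getD L _ (by omega), revMap_getD L _ (by omega)]
      have h1 : L.length - 1 - j = k + (k - 1 - j) := by omega
      have h2 : L.length - 1 - (j + k) = k - 1 - j := by omega
      rw [h1, h2]
      exact congrArg Nat.digitChar (hd (k - 1 - j) (by omega)).symm
  rw [hchar, hdiv, hmod]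
  constructor
  · intro hd
    have heq : L.take k = L.drop k := by
      apply List.ext_getElem (by rw [List.length_take, List.length_drop]; omega)
      intro i h1 h2
      rw [List.getElem_take, List.getElem_drop]
      have hik : i < k := by rw [List.length_take] at h1; omega
      have h3 := hd i hik
      rw [List.getD_eq_getElem _ _ (by omega), List.getD_eq_getElem _ _ (by omega)] at h3
      exact h3
    rw [heq]
  · intro hv i hi
    have heq : L.take k = L.drop k :=
      ofDigits_inj _ _ (by rw [List.length_take, List.length_drop]; omega)
        (fun d hd => hlt d (List.mem_of_mem_take hd))
        (fun d hd => hlt d (List.mem_of_mem_drop hd)) (by omega)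
    have h1 : i < (L.take k).length := by rw [List.length_take]; omega
    have h2 := List.getElem_of_eq heq h1
    rw [List.getElem_take, List.getElem_drop] at h2
    rw [List.getD_eq_getElem _ _ (by omega), List.getD_eq_getElem _ _ (by omega)]
    exact h2

-- ===== VERDICT (by name: the statement is the Claim_ definition above) =====
theorem is_repeat_spec : Claim_equal_is_repeat := by
  intro value _
  unfold Spec_is_repeat is_repeat is_repeat_alt
  by_cases hneg : value ≤ 0
  · rw [if_pos hneg]
    rcases lt_or_eq_of_le hneg with hlt | h0
    · -- negative: first char '-' never equals a digit char
      simp only [PySem.Int.toChars, if_pos hlt]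
      rw [toDigits_eq value.natAbs (by omega)]
      by_cases hodd :
          ('-' :: ((Nat.digits 10 value.natAbs).map Nat.digitChar).reverse).length % 2 ≠ 0
      · rw [if_pos hodd]
      · rw [if_neg hodd]
        exact neg_loop _ (by simp only [ne_eq, Nat.digits_ne_nil_iff_ne_zero]; omega) _
          (by simp)
    · -- value = 0
      subst h0
      simp [PySem.Int.toChars, show Nat.toDigits 10 0 = ['0'] from rfl]
  · rw [if_neg hneg]
    push_neg at hneg
    set m := value.toNat with hmdef
    have hm : 0 < m := by omega
    have hvm : value = (m : Int) := by omega
    simp only [PySem.Int.toChars, if_neg (by omega : ¬ value < 0)]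
    rw [toDigits_eq m hm]
    set L := Nat.digits 10 m with hL
    have hlenL : ((L.map Nat.digitChar).reverse).length = L.length := by simp
    have hnd : altNumDigits value = L.length := by
      rw [altNumDigits_len value.toNat value (by omega) rfl]
    rw [hnd, hlenL]
    by_cases hodd : L.length % 2 ≠ 0
    · rw [if_pos hodd, if_pos hodd]
    · rw [if_neg hodd, if_neg hodd]
      push_neg at hodd
      set k := L.length / 2 with hk
      have hlen2 : L.length = 2 * k := by omega
      rw [loop_eq_decide_zero]
      have harith := pos_case m hm k hlen2
      have hdivmod :
          (PySem.Int.floordiv value (10 ^ k) == PySem.Int.mod value (10 ^ k))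
            = decide (m / 10 ^ k = m % 10 ^ k) := by
        rw [hvm]
        have hp : ((10:Int) ^ k) = ((10 ^ k : Nat) : Int) := by push_cast; ring
        rw [hp, PySem.Int.floordiv_natCast, PySem.Int.mod_natCast]
        by_cases hq : m / 10 ^ k = m % 10 ^ k
        · simp [hq]
        · simp only [hq, decide_false]
          rw [beq_eq_false_iff_ne]
          intro hx
          exact hq (by exact_mod_cast hx)
      rw [hdivmod, decide_eq_decide]
      exact harith
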